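-- pv_equiv track=rewrite | github.com/ctheis21/CERNDay1AM | ExerciseAddList-v1.py | addList
-- ===== SOURCE A (Python) =====
-- def addList(li1, li2, default=0):
--
--     li1_tmp=li1.copy() # <=> li1_tmp=li1[:]
--     li2_tmp=li2.copy()
--
--     if len(li1) < len(li2):
--         li1_tmp.extend([default]*(len(li2)-len(li1)))
--
--     elif len(li2) < len(li1):
--         li2_tmp.extend([default]*(len(li1)-len(li2)))
--
--     res=[]
--     for i in range(len(li1_tmp)):
--         res.append(li1_tmp[i]+li2_tmp[i])
--
--     return res
-- ===== SOURCE B (Python) =====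
-- def addList(li1, li2, default=0):
--     # Scatter-add: start from a copy of the longer list, accumulate the shorter
--     # into its prefix in place, then add default to the uncovered tail slots.
--     if len(li1) >= len(li2):
--         res, short = list(li1), li2
--     else:
--         res, short = list(li2), li1
--     for i, x in enumerate(short):
--         res[i] += x
--     for i in range(len(short), len(res)):
--         res[i] += default
--     return res
-- ===== Notes on version B (the rewrite author's own statement) =====
-- stated objective: alternative
-- what changed: Instead of padding both lists and index-looping to build a fresh result, B copies the longer list once and scatter-adds the shorter list into its prefix in place, then adds default to the uncovered tail slots.
import Mathlib
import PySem

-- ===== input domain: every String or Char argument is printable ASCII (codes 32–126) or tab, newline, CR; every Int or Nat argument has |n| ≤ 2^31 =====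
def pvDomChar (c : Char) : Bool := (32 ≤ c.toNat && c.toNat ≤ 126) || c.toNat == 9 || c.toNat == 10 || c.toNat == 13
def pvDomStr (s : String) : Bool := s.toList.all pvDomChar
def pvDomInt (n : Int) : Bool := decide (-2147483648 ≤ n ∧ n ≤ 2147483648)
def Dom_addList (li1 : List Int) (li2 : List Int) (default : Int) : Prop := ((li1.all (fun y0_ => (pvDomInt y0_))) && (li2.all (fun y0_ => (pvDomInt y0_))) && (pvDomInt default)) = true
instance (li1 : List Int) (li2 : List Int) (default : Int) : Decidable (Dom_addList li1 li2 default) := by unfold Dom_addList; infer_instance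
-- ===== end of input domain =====

-- B replaces A's pad-both-then-index-loop construction by scatter-addition: it copies
-- the longer list once, adds the shorter list into its prefix in place, then adds the
-- default into the uncovered tail slots (alternative decomposition, same cost).

-- ===== PORT A =====
-- copy both lists, pad the shorter with `default`, then index-loop and append sums
def addList (li1 : List Int) (li2 : List Int) (default : Int) : List Int :=
  let li1_tmp := li1
  let li2_tmp := li2
  let li1_tmp :=
    if li1.length < li2.length then
      li1_tmp ++ List.replicate (li2.length - li1.length) default
    else li1_tmp
  let li2_tmp :=
    if li2.length < li1.length ∧ ¬ li1.length < li2.length then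
      li2_tmp ++ List.replicate (li1.length - li2.length) default
    else li2_tmp
  (PySem.List.pyRange 0 (li1_tmp.length) 1).foldl
    (fun res i => res ++ [PySem.List.pyGetD li1_tmp i 0 + PySem.List.pyGetD li2_tmp i 0]) []

-- ===== PORT B =====
-- res := copy of the longer list, short := the other; for i,x in enumerate(short): res[i] += x;
-- for i in range(len(short), len(res)): res[i] += default
def addList_alt (li1 : List Int) (li2 : List Int) (default : Int) : List Int :=
  let p := if li2.length ≤ li1.length then (li1, li2) else (li2, li1)
  let res := p.1
  let short := p.2
  let res := (PySem.List.enumerate short 0).foldl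
    (fun r q => PySem.List.pySetD r q.1 (PySem.List.pyGetD r q.1 0 + q.2)) res
  (PySem.List.pyRange (short.length : Int) (res.length : Int) 1).foldl
    (fun r i => PySem.List.pySetD r i (PySem.List.pyGetD r i 0 + default)) res

-- ===== PRECONDITION & SPEC =====
def Spec_addList (li1 : List Int) (li2 : List Int) (default : Int) (out : List Int) : Prop := out = addList_alt li1 li2 default
instance (li1 : List Int) (li2 : List Int) (default : Int) (out : List Int) : Decidable (Spec_addList li1 li2 default out) := by unfold Spec_addList; infer_instance

-- ===== CLAIM (what is proved, stated in full; the proofs are below) =====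
def Claim_equal_addList : Prop := ∀ (li1 : List Int) (li2 : List Int) (default : Int), Dom_addList li1 li2 default → Spec_addList li1 li2 default (addList li1 li2 default)

-- ===== LEMMAS AND PROOFS =====

-- A's index loop over two equal-length lists is zipWith (+)
theorem map_range_pyGetD_eq_zipWith (t1 t2 : List Int) (h : t1.length = t2.length) :
    (PySem.List.pyRange 0 (t1.length) 1).map
      (fun i => PySem.List.pyGetD t1 i 0 + PySem.List.pyGetD t2 i 0)
      = List.zipWith (· + ·) t1 t2 := by
  induction t1 generalizing t2 with
  | nil => simp
  | cons a as_ ih =>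
    cases t2 with
    | nil => simp at h
    | cons b bs =>
      have hcons : PySem.List.pyRange 0 ((a :: as_).length) 1
          = 0 :: PySem.List.pyRange 1 ((a :: as_).length) 1 := by
        apply PySem.List.pyRange_one_cons; simp
      have hshift : PySem.List.pyRange 1 ((a :: as_).length) 1
          = (PySem.List.pyRange 0 (as_.length) 1).map (· + 1) := by
        simp [PySem.List.pyRange_one]
        intro k _
        omega
      simp only [hcons, List.map_cons, hshift, List.map_map, List.zipWith_cons_cons]
      have hlen : as_.length = bs.length := by simpa using h
      have := ih bs hlen
      congr 1
      · simp [PySem.List.pyGetD, PySem.List.pyGet?, PySem.List.pyIdx?]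
      · rw [← this]
        apply List.map_congr_left
        intro k hk
        have hk' : 0 ≤ k ∧ k < (as_.length : Int) := by
          simpa [PySem.List.mem_pyRange_one] using hk
        simp only [Function.comp]
        have g1 : PySem.List.pyGetD (a :: as_) (k + 1) 0 = PySem.List.pyGetD as_ k 0 := by
          have : ((k + 1 : Int)) = ((k.toNat + 1 : Nat) : Int) := by omega
          rw [this, PySem.List.pyGetD_natCast]
          have : (k : Int) = ((k.toNat : Nat) : Int) := by omega
          rw [this, PySem.List.pyGetD_natCast]
          simp
          have hm : max k 0 = k := by omega
          rw [hm]
        have g2 : PySem.List.pyGetD (b :: bs) (k + 1) 0 = PySem.List.pyGetD bs k 0 := by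
          have : ((k + 1 : Int)) = ((k.toNat + 1 : Nat) : Int) := by omega
          rw [this, PySem.List.pyGetD_natCast]
          have : (k : Int) = ((k.toNat : Nat) : Int) := by omega
          rw [this, PySem.List.pyGetD_natCast]
          simp
          have hm : max k 0 = k := by omega
          rw [hm]
        rw [g1, g2]

theorem pad_length (li1 li2 : List Int) (d : Int) :
    (li1 ++ List.replicate (li2.length - li1.length) d).length
      = (li2 ++ List.replicate (li1.length - li2.length) d).length := by
  simp; omega

-- A as a zipWith over the two padded lists
theorem addList_eq_zipWith_pad (li1 li2 : List Int) (d : Int) :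
    addList li1 li2 d
      = List.zipWith (· + ·)
          (li1 ++ List.replicate (li2.length - li1.length) d)
          (li2 ++ List.replicate (li1.length - li2.length) d) := by
  unfold addList
  simp only []
  set t1 := if li1.length < li2.length then li1 ++ List.replicate (li2.length - li1.length) d else li1 with ht1
  set t2 := if li2.length < li1.length ∧ ¬ li1.length < li2.length then li2 ++ List.replicate (li1.length - li2.length) d else li2 with ht2
  have e1 : t1 = li1 ++ List.replicate (li2.length - li1.length) d := by
    rw [ht1]; split_ifs with h
    · rfl
    · have : li2.length - li1.length = 0 := by omega
      simp [this]
  have e2 : t2 = li2 ++ List.replicate (li1.length - li2.length) d := by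
    rw [ht2]; split_ifs with h
    · rfl
    · have : li1.length - li2.length = 0 := by omega
      simp [this]
  rw [PySem.List.foldl_append_singleton_eq_map]
  have hlen : t1.length = t2.length := by rw [e1, e2]; exact pad_length li1 li2 d
  rw [List.nil_append, map_range_pyGetD_eq_zipWith t1 t2 hlen, e1, e2]

-- padding the right list is: zip the common prefix, shift the longer tail by d
theorem zipWith_replicate_add (l1 : List Int) (d : Int) :
    List.zipWith (· + ·) l1 (List.replicate l1.length d) = l1.map (· + d) := by
  induction l1 with
  | nil => simp
  | cons a t ih => simpa [List.replicate_succ] using ih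

theorem zipWith_append_replicate (l2 : List Int) : ∀ (l1 : List Int) (d : Int),
    l2.length ≤ l1.length →
    List.zipWith (· + ·) l1 (l2 ++ List.replicate (l1.length - l2.length) d)
      = List.zipWith (· + ·) l1 l2 ++ (l1.drop l2.length).map (· + d) := by
  induction l2 with
  | nil =>
    intro l1 d _
    simpa using zipWith_replicate_add l1 d
  | cons b bs ih =>
    intro l1 d h
    cases l1 with
    | nil => simp at h
    | cons a as_ =>
      have h' : bs.length ≤ as_.length := by simpa using h
      have hl : (a :: as_).length - (b :: bs).length = as_.length - bs.length := by
        simp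
      simp only [List.cons_append, List.zipWith_cons_cons, List.drop_succ_cons,
        List.length_cons]
      rw [show as_.length + 1 - (bs.length + 1) = as_.length - bs.length from by omega]
      rw [ih as_ d h']

-- take/drop of a set at the boundary slot
theorem take_succ_set (r : List Int) (s : Nat) (v : Int) (h : s < r.length) :
    (r.set s v).take (s + 1) = r.take s ++ [v] := by
  rw [List.set_eq_take_append_cons_drop, if_pos h, List.take_append]
  have hl : (r.take s).length = s := by simp; omega
  simp [hl, List.take_take]

-- B's first loop: scatter-add `short` into the prefix of r starting at slot s
theorem scatter_loop (short : List Int) : ∀ (s : Nat) (r : List Int),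
    s + short.length ≤ r.length →
    (PySem.List.enumerate short (s : Int)).foldl
        (fun r q => PySem.List.pySetD r q.1 (PySem.List.pyGetD r q.1 0 + q.2)) r
      = r.take s ++ List.zipWith (· + ·) (r.drop s) short ++ r.drop (s + short.length) := by
  induction short with
  | nil =>
    intro s r _
    simp
  | cons a as_ ih =>
    intro s r h
    have hs : s < r.length := by simp at h; omega
    rw [PySem.List.enumerate_cons]
    simp only [List.foldl_cons]
    rw [PySem.List.pySetD_natCast, PySem.List.pyGetD_natCast,
      List.getD_eq_getElem r 0 hs]
    have hcast : ((s : Int) + 1) = ((s + 1 : Nat) : Int) := by push_cast; ring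
    rw [hcast]
    have hlen : s + 1 + as_.length ≤ (r.set s (r[s] + a)).length := by
      simp at h ⊢; omega
    rw [ih (s + 1) _ hlen]
    rw [take_succ_set r s _ hs]
    rw [List.drop_set, if_pos (by omega)]
    rw [List.drop_set, if_pos (by omega)]
    rw [List.drop_eq_getElem_cons hs]
    simp only [List.zipWith_cons_cons, List.length_cons]
    have : s + (as_.length + 1) = s + 1 + as_.length := by omega
    rw [this]
    simp

-- B's second loop: add d to every slot from s on (when the range reaches r.length)
theorem range_add_loop (m : Nat) : ∀ (s : Nat) (r : List Int) (d : Int),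
    s + m = r.length →
    (PySem.List.pyRange (s : Int) ((s + m : Nat) : Int) 1).foldl
        (fun r i => PySem.List.pySetD r i (PySem.List.pyGetD r i 0 + d)) r
      = r.take s ++ (r.drop s).map (· + d) := by
  induction m with
  | zero =>
    intro s r d h
    rw [PySem.List.pyRange_one_eq_nil (by omega)]
    have : r.length ≤ s := by omega
    simp [List.take_of_length_le this, List.drop_eq_nil_of_le this]
  | succ m ih =>
    intro s r d h
    have hs : s < r.length := by omega
    rw [PySem.List.pyRange_one_cons (by push_cast; omega)]
    simp only [List.foldl_cons]
    rw [PySem.List.pySetD_natCast, PySem.List.pyGetD_natCast,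
      List.getD_eq_getElem r 0 hs]
    have hcast : ((s : Int) + 1) = ((s + 1 : Nat) : Int) := by push_cast; ring
    have hcast2 : ((s + (m + 1) : Nat) : Int) = (((s + 1) + m : Nat) : Int) := by
      push_cast; ring
    rw [hcast, hcast2]
    have hlen : s + 1 + m = (r.set s (r[s] + d)).length := by simp; omega
    rw [ih (s + 1) _ d hlen]
    rw [take_succ_set r s _ hs]
    rw [List.drop_set, if_pos (by omega)]
    simp
    rw [List.drop_eq_getElem_cons
      (show s < (List.map (fun x => x + d) r).length by simpa using hs)]
    simp

theorem addList_eq_alt (li1 li2 : List Int) (d : Int) :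
    addList li1 li2 d = addList_alt li1 li2 d := by
  unfold addList_alt
  by_cases h : li2.length ≤ li1.length
  · simp only [if_pos h]
    have hsc := scatter_loop li2 0 li1 (by omega)
    simp only [Nat.cast_zero] at hsc
    rw [hsc]
    simp only [List.take_zero, List.drop_zero, List.nil_append, Nat.zero_add]
    set R1 := List.zipWith (· + ·) li1 li2 ++ li1.drop li2.length with hR1
    have hzl : (List.zipWith (· + ·) li1 li2).length = li2.length := by
      simp; omega
    have hR1len : R1.length = li1.length := by
      rw [hR1]; simp; omega
    have hcast : (R1.length : Int) = ((li2.length + (li1.length - li2.length) : Nat) : Int) := by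
      rw [hR1len]; push_cast; omega
    rw [hcast, range_add_loop (li1.length - li2.length) li2.length R1 d (by omega)]
    rw [hR1, List.take_append_of_le_length (by omega), List.take_of_length_le (by omega)]
    rw [List.drop_append_of_le_length (by omega), List.drop_of_length_le (by omega),
      List.nil_append]
    rw [addList_eq_zipWith_pad]
    have : li2.length - li1.length = 0 := by omega
    rw [this, List.replicate_zero, List.append_nil]
    exact zipWith_append_replicate li2 li1 d h
  · simp only [if_neg h]
    have h' : li1.length ≤ li2.length := by omega
    have hsc := scatter_loop li1 0 li2 (by omega)
    simp only [Nat.cast_zero] at hsc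
    rw [hsc]
    simp only [List.take_zero, List.drop_zero, List.nil_append, Nat.zero_add]
    set R1 := List.zipWith (· + ·) li2 li1 ++ li2.drop li1.length with hR1
    have hzl : (List.zipWith (· + ·) li2 li1).length = li1.length := by
      simp; omega
    have hR1len : R1.length = li2.length := by
      rw [hR1]; simp; omega
    have hcast : (R1.length : Int) = ((li1.length + (li2.length - li1.length) : Nat) : Int) := by
      rw [hR1len]; push_cast; omega
    rw [hcast, range_add_loop (li2.length - li1.length) li1.length R1 d (by omega)]
    rw [hR1, List.take_append_of_le_length (by omega), List.take_of_length_le (by omega)]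
    rw [List.drop_append_of_le_length (by omega), List.drop_of_length_le (by omega),
      List.nil_append]
    rw [addList_eq_zipWith_pad]
    have : li1.length - li2.length = 0 := by omega
    rw [this, List.replicate_zero, List.append_nil]
    rw [List.zipWith_comm_of_comm (fun a b => Int.add_comm a b)
      (l := li1 ++ List.replicate (li2.length - li1.length) d) (l' := li2)]
    exact zipWith_append_replicate li1 li2 d h' 

-- ===== VERDICT (by name: the statement is the Claim_ definition above) =====
theorem addList_spec : Claim_equal_addList := by
  intro li1 li2 d _
  unfold Spec_addList
  exact addList_eq_alt li1 li2 d
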